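-- pv_equiv track=rewrite | github.com/MaksShI/geekshop | Python/CODWARS/Counter of neighbor ones.py | ones_counter
-- ===== SOURCE A (Python) =====
-- def knock(mass):
--     k = 0
--     for i in mass:
--         if i == 0:
--             mass.pop(k)
--         k += 1
--     return mass
--
-- def ones_counter(inp):
--     s = 0
--     mass = []
--     if not 1 in inp:
--         return []
--     for i in inp:
--         if i == 1:
--             s += 1
--         else:
--             mass.append(s)
--             s = 0
--     mass.append(s)
--     while 0 in mass:
--         knock(mass)
--     return mass
-- ===== SOURCE B (Python) =====
-- def ones_counter(inp):
--     out = []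
--     run = 0
--     for i in inp:
--         if i == 1:
--             run += 1
--         else:
--             if run > 0:
--                 out.append(run)
--             run = 0
--     if run > 0:
--         out.append(run)
--     return out
-- ===== Notes on version B (the rewrite author's own statement) =====
-- stated objective: simpler
-- what changed: B builds the list of positive 1-run lengths directly in a single pass (appending a run only when it is positive), instead of A's appending every run including zeros and then repeatedly rescanning and rewriting the list with the knock while-loop to delete the zeros.
import Mathlib
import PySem

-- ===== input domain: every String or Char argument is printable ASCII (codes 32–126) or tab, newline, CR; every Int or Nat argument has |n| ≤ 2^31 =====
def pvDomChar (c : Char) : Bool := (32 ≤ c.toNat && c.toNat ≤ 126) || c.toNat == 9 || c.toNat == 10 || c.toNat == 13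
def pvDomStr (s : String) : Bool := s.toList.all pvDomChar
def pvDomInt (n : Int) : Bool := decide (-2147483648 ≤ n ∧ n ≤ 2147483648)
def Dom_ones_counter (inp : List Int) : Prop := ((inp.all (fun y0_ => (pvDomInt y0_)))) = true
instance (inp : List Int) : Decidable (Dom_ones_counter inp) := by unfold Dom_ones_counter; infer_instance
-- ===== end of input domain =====

-- B replaces A's append-all-runs-then-repeatedly-knock-out-zeros scheme by a single pass
-- that appends a run length only when it is positive (objective: simpler).


-- ===== PORT A =====
-- knock's counter k always equals the for-loop's internal position (both start at 0 and both
-- advance by exactly 1 per iteration), so a single index j models `for i in mass` and `pop(k)`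
-- exactly, including the skip of the element that slides into position j after a pop.
def knockGo (m : List Int) (j : Nat) : List Int :=
  if h : j < m.length then
    if m[j] = 0 then knockGo (m.eraseIdx j) (j + 1) else knockGo m (j + 1)
  else m
termination_by m.length - j
decreasing_by
  · simp only [List.length_eraseIdx, h, if_pos]; omega
  · omega

def knock (m : List Int) : List Int := knockGo m 0

-- `while 0 in mass: knock(mass)`: each knock with 0 ∈ mass strictly shortens mass, so
-- mass.length iterations of fuel make the same computation total.
def knockWhile : Nat → List Int → List Int
  | 0, m => m
  | fuel + 1, m => if (0 : Int) ∈ m then knockWhile fuel (knock m) else m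

def aStep (sm : Int × List Int) (i : Int) : Int × List Int :=
  if i = 1 then (sm.1 + 1, sm.2) else ((0 : Int), sm.2 ++ [sm.1])

def ones_counter (inp : List Int) : List Int :=
  if (1 : Int) ∈ inp then
    let p := inp.foldl aStep ((0 : Int), ([] : List Int))
    let mass := p.2 ++ [p.1]
    knockWhile mass.length mass
  else []

-- ===== PORT B =====
def bStep (sm : Int × List Int) (i : Int) : Int × List Int :=
  if i = 1 then (sm.1 + 1, sm.2)
  else if sm.1 > 0 then ((0 : Int), sm.2 ++ [sm.1]) else ((0 : Int), sm.2)

def ones_counter_alt (inp : List Int) : List Int :=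
  let p := inp.foldl bStep ((0 : Int), ([] : List Int))
  if p.1 > 0 then p.2 ++ [p.1] else p.2

-- ===== PRECONDITION & SPEC =====
def Spec_ones_counter (inp : List Int) (out : List Int) : Prop := out = ones_counter_alt inp
instance (inp : List Int) (out : List Int) : Decidable (Spec_ones_counter inp out) := by unfold Spec_ones_counter; infer_instance

-- ===== CLAIM (what is proved, stated in full; the proofs are below) =====
def Claim_equal_ones_counter : Prop := ∀ (inp : List Int), Dom_ones_counter inp → Spec_ones_counter inp (ones_counter inp)

-- ===== LEMMAS AND PROOFS =====

theorem filter_eraseIdx_zero : ∀ (m : List Int) (j : Nat), (h : j < m.length) → m[j] = 0 →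
    (m.eraseIdx j).filter (fun x => x != 0) = m.filter (fun x => x != 0) := by
  intro m
  induction m with
  | nil => intro j h; simp at h
  | cons a t ih =>
    intro j h h0
    cases j with
    | zero => simp_all
    | succ j =>
      simp only [List.eraseIdx_cons_succ, List.filter_cons]
      rw [ih j (by simpa using h) (by simpa using h0)]

theorem knockGo_filter : ∀ (m : List Int) (j : Nat),
    (knockGo m j).filter (fun x => x != 0) = m.filter (fun x => x != 0) := by
  intro m j
  induction m, j using knockGo.induct with
  | case1 m j h h0 ih => rw [knockGo]; simp only [h, dif_pos, h0, if_pos]; rw [ih, filter_eraseIdx_zero m j h h0]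
  | case2 m j h h0 ih => rw [knockGo]; simp only [h, dif_pos, h0]; exact ih
  | case3 m j h => rw [knockGo]; simp [h]

theorem knockGo_length_le : ∀ (m : List Int) (j : Nat), (knockGo m j).length ≤ m.length := by
  intro m j
  induction m, j using knockGo.induct with
  | case1 m j h h0 ih =>
    rw [knockGo]; simp only [h, dif_pos, h0, if_pos]
    have : (m.eraseIdx j).length = m.length - 1 := by simp [List.length_eraseIdx, h]
    omega
  | case2 m j h h0 ih => rw [knockGo]; simp only [h, dif_pos, h0]; exact ih
  | case3 m j h => rw [knockGo]; simp [h]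

theorem knockGo_length_lt : ∀ (m : List Int) (j : Nat), (0 : Int) ∈ m.drop j →
    (knockGo m j).length < m.length := by
  intro m j
  induction m, j using knockGo.induct with
  | case1 m j h h0 ih =>
    intro _
    rw [knockGo]; simp only [h, dif_pos, h0, if_pos]
    have h1 := knockGo_length_le (m.eraseIdx j) (j + 1)
    have h2 : (m.eraseIdx j).length = m.length - 1 := by simp [List.length_eraseIdx, h]
    omega
  | case2 m j h h0 ih =>
    intro hm
    rw [knockGo]; simp only [h, dif_pos, h0]
    apply ih
    rw [List.drop_eq_getElem_cons h] at hm
    rcases List.mem_cons.mp hm with hm | hm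
    · exact absurd hm.symm h0
    · exact hm
  | case3 m j h =>
    intro hm
    rw [List.drop_of_length_le (by omega)] at hm
    simp at hm

theorem knockWhile_filter : ∀ (fuel : Nat) (m : List Int), m.length ≤ fuel →
    knockWhile fuel m = m.filter (fun x => x != 0) := by
  intro fuel
  induction fuel with
  | zero =>
    intro m hm
    have : m = [] := List.eq_nil_of_length_eq_zero (by omega)
    subst this; rfl
  | succ fuel ih =>
    intro m hm
    rw [knockWhile]
    by_cases h0 : (0 : Int) ∈ m
    · rw [if_pos h0]
      have hlt : (knock m).length < m.length := knockGo_length_lt m 0 (by simpa using h0)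
      rw [ih (knock m) (by omega)]
      exact knockGo_filter m 0
    · rw [if_neg h0]
      rw [List.filter_eq_self.mpr]
      intro x hx
      simp only [bne_iff_ne, ne_eq]
      intro hx0; exact h0 (hx0 ▸ hx)

theorem fold_eq : ∀ (inp : List Int) (s : Int) (mass out : List Int), 0 ≤ s →
    out = mass.filter (fun x => x != 0) →
    ((inp.foldl aStep (s, mass)).2 ++ [(inp.foldl aStep (s, mass)).1]).filter (fun x => x != 0)
      = (if (inp.foldl bStep (s, out)).1 > 0
          then (inp.foldl bStep (s, out)).2 ++ [(inp.foldl bStep (s, out)).1]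
          else (inp.foldl bStep (s, out)).2) := by
  intro inp
  induction inp with
  | nil =>
    intro s mass out hs hout
    simp only [List.foldl_nil, List.filter_append, hout]
    by_cases h : s > 0
    · rw [if_pos h]
      have : ((s : Int) != 0) = true := by simp; omega
      simp [this]
    · rw [if_neg h]
      have hs0 : s = 0 := by omega
      simp [hs0]
  | cons i rest ih =>
    intro s mass out hs hout
    simp only [List.foldl_cons]
    by_cases hi : i = 1
    · have ha : aStep (s, mass) i = (s + 1, mass) := by simp [aStep, hi]
      have hb : bStep (s, out) i = (s + 1, out) := by simp [bStep, hi]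
      rw [ha, hb]
      exact ih (s + 1) mass out (by omega) hout
    · have ha : aStep (s, mass) i = (0, mass ++ [s]) := by simp [aStep, hi]
      rw [ha]
      by_cases h : s > 0
      · have hb : bStep (s, out) i = (0, out ++ [s]) := by simp [bStep, hi, h]
        rw [hb]
        apply ih 0 (mass ++ [s]) (out ++ [s]) le_rfl
        have : ((s : Int) != 0) = true := by simp; omega
        simp [List.filter_append, hout, this]
      · have hs0 : s = 0 := by omega
        have hb : bStep (s, out) i = (0, out) := by simp [bStep, hi, h]
        rw [hb]
        apply ih 0 (mass ++ [s]) out le_rfl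
        simp [List.filter_append, hout, hs0]

theorem bfold_no_one : ∀ (inp : List Int) (out : List Int), (1 : Int) ∉ inp →
    inp.foldl bStep ((0 : Int), out) = ((0 : Int), out) := by
  intro inp
  induction inp with
  | nil => intro out _; rfl
  | cons i rest ih =>
    intro out h
    have hi : i ≠ 1 := fun hc => h (by simp [hc])
    simp only [List.foldl_cons, bStep, if_neg hi]
    simpa using ih out (fun hc => h (List.mem_cons_of_mem _ hc))

-- ===== VERDICT (by name: the statement is the Claim_ definition above) =====
theorem ones_counter_spec : Claim_equal_ones_counter := by
  intro inp _
  unfold Spec_ones_counter ones_counter ones_counter_alt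
  by_cases h1 : (1 : Int) ∈ inp
  · rw [if_pos h1]
    rw [knockWhile_filter _ _ le_rfl]
    exact fold_eq inp 0 [] [] le_rfl rfl
  · rw [if_neg h1]
    rw [bfold_no_one inp [] h1]
    simp
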